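-- pv_equiv track=rewrite | github.com/DillonB07/Leetcode | 1814-count-nice-pairs-in-array.py | countNicePairs
-- ===== SOURCE A (Python) =====
-- from typing import List
--
-- def countNicePairs(nums: List[int]) -> int:
--     MOD = 10**9 + 7
--     rev_diff_freq = {}
--     nice_pairs = 0
--
--     for num in nums:
--         rev_num = int(str(num)[::-1])
--         diff = num - rev_num
--         rev_diff_freq[diff] = rev_diff_freq.get(diff, 0) + 1
--
--     for count in rev_diff_freq.values():
--         # Calculate the number of pairs that can be formed with 'count' occurrences of a particular difference
--         nice_pairs = (nice_pairs + (count * (count - 1) // 2)) % MOD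
--
--     return nice_pairs
-- ===== SOURCE B (Python) =====
-- from typing import List
--
-- def countNicePairs(nums: List[int]) -> int:
--     # one pass: running pair total, counting previously seen equal diffs
--     MOD = 10**9 + 7
--     seen = {}
--     nice_pairs = 0
--     for num in nums:
--         diff = num - int(str(num)[::-1])
--         nice_pairs = (nice_pairs + seen.get(diff, 0)) % MOD
--         seen[diff] = seen.get(diff, 0) + 1
--     return nice_pairs
-- ===== Notes on version B (the rewrite author's own statement) =====
-- stated objective: simpler
-- what changed: Replaced A's two-phase scheme (build a full diff-frequency dict, then a second loop summing count*(count-1)//2 over its values) by a single pass that, for each element, adds the number of previously seen equal diffs to a running pair total mod 1e9+7; the dict now holds running seen-counts, not final frequencies.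
import Mathlib
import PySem

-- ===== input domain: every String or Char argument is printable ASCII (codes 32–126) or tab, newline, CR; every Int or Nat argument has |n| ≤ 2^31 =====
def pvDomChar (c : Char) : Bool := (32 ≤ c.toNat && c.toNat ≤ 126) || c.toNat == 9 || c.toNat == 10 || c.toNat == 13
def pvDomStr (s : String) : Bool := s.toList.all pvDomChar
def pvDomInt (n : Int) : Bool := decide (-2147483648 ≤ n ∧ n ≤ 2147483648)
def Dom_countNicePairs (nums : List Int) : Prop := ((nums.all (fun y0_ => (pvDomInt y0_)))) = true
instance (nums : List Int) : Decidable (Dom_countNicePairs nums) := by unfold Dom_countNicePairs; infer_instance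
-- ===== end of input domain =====

-- B replaces A's build-frequency-table-then-second-combinatorial-loop by a single pass that
-- accumulates the running pair count from previously seen equal differences (objective: simpler).

-- ===== PORT A =====
-- num - int(str(num)[::-1]); the .getD 0 is unreachable under Pre_ (Python raises ValueError for num < 0)
def revDiff (num : Int) : Int :=
  num - ((PySem.Int.ofChars? (PySem.Int.toChars num).reverse).getD 0)

def countNicePairs (nums : List Int) : Int :=
  let M : Int := 10 ^ 9 + 7
  let freq := nums.foldl (fun d num =>
      let diff := revDiff num
      d.insert diff (d.getD diff 0 + 1)) (PySem.Dict.empty : PySem.Dict Int Int)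
  freq.values.foldl (fun acc c =>
      PySem.Int.mod (acc + PySem.Int.floordiv (c * (c - 1)) 2) M) 0

-- ===== PORT B =====
def countNicePairs_alt (nums : List Int) : Int :=
  let M : Int := 10 ^ 9 + 7
  let st := nums.foldl (fun (st : PySem.Dict Int Int × Int) num =>
      let diff := revDiff num
      let np := PySem.Int.mod (st.2 + st.1.getD diff 0) M
      (st.1.insert diff (st.1.getD diff 0 + 1), np)) ((PySem.Dict.empty : PySem.Dict Int Int), 0)
  st.2

-- ===== PRECONDITION & SPEC =====
-- Pre_ excludes lists containing a negative number: there int(str(num)[::-1]) raises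
-- ValueError in Python A (the reversed string ends in '-'), so A returns nothing.
def Pre_countNicePairs (nums : List Int) : Prop := ∀ n ∈ nums, 0 ≤ n
instance (nums : List Int) : Decidable (Pre_countNicePairs nums) := by unfold Pre_countNicePairs; infer_instance
def pvWitness_countNicePairs : List Int := [12, 21, 0, 12]

def Spec_countNicePairs (nums : List Int) (out : Int) : Prop := out = countNicePairs_alt nums
instance (nums : List Int) (out : Int) : Decidable (Spec_countNicePairs nums out) := by unfold Spec_countNicePairs; infer_instance

-- ===== CLAIM (what is proved, stated in full; the proofs are below) =====
def Claim_equal_countNicePairs : Prop := ∀ (nums : List Int), Dom_countNicePairs nums → Pre_countNicePairs nums → Spec_countNicePairs nums (countNicePairs nums)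

-- ===== LEMMAS AND PROOFS =====

-- pair function of A's second loop
def pairF (c : Int) : Int := PySem.Int.floordiv (c * (c - 1)) 2

-- running count of earlier equal elements (B's accumulation), prefix p already seen
def pairSum : List Int → List Int → Int
  | _, [] => 0
  | p, x :: t => (List.count x p : Int) + pairSum (p ++ [x]) t

-- sum of pairF over the distinct elements' counts
def pairTotal (p : List Int) : Int :=
  ((PySem.Set.ofList p).map (fun k => pairF (List.count k p : Int))).sum

theorem pymod_eq (a : Int) : PySem.Int.mod a (10 ^ 9 + 7) = a % (10 ^ 9 + 7) := by
  simp [PySem.Int.mod, Int.fmod_eq_emod]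

theorem pairF_step (c : Int) : pairF (c + 1) = pairF c + c := by
  unfold pairF PySem.Int.floordiv
  obtain ⟨k, hk⟩ := Int.even_mul_succ_self (c - 1)
  have h1 : c * (c - 1) = 2 * k := by linarith [hk]
  have h2 : (c + 1) * (c + 1 - 1) = 2 * k + 2 * c := by rw [← h1]; ring
  rw [Int.fdiv_eq_ediv, Int.fdiv_eq_ediv]
  simp only [if_pos (Or.inl (by norm_num : (0:Int) ≤ 2))]
  omega

theorem sum_map_update (ks : List Int) (g g' : Int → Int) (x : Int)
    (hnd : ks.Nodup) (hx : x ∈ ks) (hoff : ∀ k ∈ ks, k ≠ x → g' k = g k) :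
    (ks.map g').sum = (ks.map g).sum + (g' x - g x) := by
  induction ks with
  | nil => cases hx
  | cons a t ih =>
    rcases List.nodup_cons.mp hnd with ⟨hat, hndt⟩
    by_cases hax : a = x
    · subst hax
      have : t.map g' = t.map g := by
        apply List.map_congr_left
        intro k hk
        exact hoff k (List.mem_cons_of_mem _ hk) (fun h => hat (h ▸ hk))
      simp [this]; ring
    · have hxt : x ∈ t := by
        rcases List.mem_cons.mp hx with h | h
        · exact absurd h.symm hax
        · exact h
      have ha : g' a = g a := hoff a List.mem_cons_self hax
      have := ih hndt hxt (fun k hk hne => hoff k (List.mem_cons_of_mem _ hk) hne)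
      simp [ha, this]; ring

theorem ofList_append_singleton (p : List Int) (x : Int) :
    PySem.Set.ofList (p ++ [x]) =
      (if x ∈ p then PySem.Set.ofList p else PySem.Set.ofList p ++ [x]) := by
  show List.foldl PySem.Set.add PySem.Set.empty (p ++ [x]) = _
  rw [List.foldl_append]
  show PySem.Set.add (PySem.Set.ofList p) x = _
  unfold PySem.Set.add
  by_cases hx : x ∈ p
  · have hc : (PySem.Set.ofList p).contains x = true := by
      have := (PySem.Set.mem_ofList p x).mpr hx
      simpa [List.contains_iff_mem] using this
    simp [hx]
  · have hc : ¬ (PySem.Set.ofList p).contains x = true := by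
      intro h
      exact hx ((PySem.Set.mem_ofList p x).mp (by simpa [List.contains_iff_mem] using h))
    simp [hx]

theorem pairTotal_step (p : List Int) (x : Int) :
    pairTotal (p ++ [x]) = pairTotal p + (List.count x p : Int) := by
  unfold pairTotal
  rw [ofList_append_singleton]
  by_cases hx : x ∈ p
  · rw [if_pos hx]
    rw [sum_map_update (PySem.Set.ofList p)
        (fun k => pairF (List.count k p : Int))
        (fun k => pairF (List.count k (p ++ [x]) : Int)) x
        (PySem.Set.nodup_ofList p) ((PySem.Set.mem_ofList p x).mpr hx)
        (by
          intro k _ hk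
          simp [List.count_append, Ne.symm hk])]
    simp [List.count_append, pairF_step, Nat.cast_add]
  · rw [if_neg hx]
    have hc0 : List.count x p = 0 := List.count_eq_zero.mpr hx
    have hmap : (PySem.Set.ofList p).map (fun k => pairF (List.count k (p ++ [x]) : Int)) =
        (PySem.Set.ofList p).map (fun k => pairF (List.count k p : Int)) := by
      apply List.map_congr_left
      intro k hk
      have : k ≠ x := fun h => hx (h ▸ (PySem.Set.mem_ofList p k).mp hk)
      simp [List.count_append, Ne.symm this]
    rw [List.map_append, List.sum_append, hmap]
    simp [List.count_append, List.count_singleton, hc0, pairF, PySem.Int.floordiv]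

theorem pairSum_eq_total : ∀ (l p : List Int), pairTotal p + pairSum p l = pairTotal (p ++ l)
  | [], p => by simp [pairSum]
  | x :: t, p => by
    have ih := pairSum_eq_total t (p ++ [x])
    simp only [pairSum]
    rw [← add_assoc, add_comm (pairTotal p) ((List.count x p : Int)),
        add_comm ((List.count x p : Int)) (pairTotal p)]
    rw [show pairTotal p + (List.count x p : Int) = pairTotal (p ++ [x]) from (pairTotal_step p x).symm]
    rw [ih]
    simp

-- A's first loop builds Counter(diffs), with the counter built on top of an already-seen prefix
theorem foldA_dict : ∀ (l p : List Int),
    l.foldl (fun d num =>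
        let diff := revDiff num
        d.insert diff (d.getD diff 0 + 1)) (PySem.Dict.counter p)
      = PySem.Dict.counter (p ++ l.map revDiff)
  | [], p => by simp
  | x :: t, p => by
    simp only [List.foldl_cons]
    have h1 : (PySem.Dict.counter p).insert (revDiff x) ((PySem.Dict.counter p).getD (revDiff x) 0 + 1)
        = PySem.Dict.counter (p ++ [revDiff x]) := by
      rw [PySem.Dict.counter_append_singleton]; rfl
    rw [show (let diff := revDiff x;
          (PySem.Dict.counter p).insert diff ((PySem.Dict.counter p).getD diff 0 + 1)) =
          PySem.Dict.counter (p ++ [revDiff x]) from h1]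
    rw [foldA_dict t (p ++ [revDiff x])]
    simp

-- A's second loop is a mod-fold of pairF over the values (g = how a value is read off)
theorem foldA_vals (g : Int → Int) : ∀ (l : List Int) (a : Int),
    l.foldl (fun acc c => PySem.Int.mod (acc + PySem.Int.floordiv (g c * (g c - 1)) 2) (10 ^ 9 + 7))
        (a % (10 ^ 9 + 7))
      = (a + (l.map (fun c => pairF (g c))).sum) % (10 ^ 9 + 7)
  | [], a => by simp
  | c :: t, a => by
    simp only [List.foldl_cons]
    rw [pymod_eq, Int.emod_add_emod]
    have := foldA_vals g t (a + PySem.Int.floordiv (g c * (g c - 1)) 2)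
    rw [this]
    simp [pairF, add_assoc]

-- B's single loop: dict carries Counter(seen prefix), acc carries the running pair count mod M
theorem foldB : ∀ (l p : List Int) (a : Int),
    (l.foldl (fun (st : PySem.Dict Int Int × Int) num =>
        let diff := revDiff num
        let np := PySem.Int.mod (st.2 + st.1.getD diff 0) (10 ^ 9 + 7)
        (st.1.insert diff (st.1.getD diff 0 + 1), np))
        (PySem.Dict.counter p, a % (10 ^ 9 + 7))).2
      = (a + pairSum p (l.map revDiff)) % (10 ^ 9 + 7)
  | [], p, a => by simp [pairSum]
  | x :: t, p, a => by
    simp only [List.foldl_cons]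
    have hdict : (PySem.Dict.counter p).insert (revDiff x) ((PySem.Dict.counter p).getD (revDiff x) 0 + 1)
        = PySem.Dict.counter (p ++ [revDiff x]) := by
      rw [PySem.Dict.counter_append_singleton]; rfl
    have hacc : PySem.Int.mod ((a % (10 ^ 9 + 7)) + (PySem.Dict.counter p).getD (revDiff x) 0) (10 ^ 9 + 7)
        = (a + (List.count (revDiff x) p : Int)) % (10 ^ 9 + 7) := by
      rw [pymod_eq, Int.emod_add_emod, PySem.Dict.getD_counter]
    simp only [hdict, hacc]
    have := foldB t (p ++ [revDiff x]) (a + (List.count (revDiff x) p : Int))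
    rw [this]
    simp [pairSum, add_assoc]

theorem countNicePairs_eq (nums : List Int) :
    countNicePairs nums = pairTotal (nums.map revDiff) % (10 ^ 9 + 7) := by
  unfold countNicePairs
  simp only []
  rw [show (PySem.Dict.empty : PySem.Dict Int Int) = PySem.Dict.counter ([] : List Int) from rfl]
  rw [foldA_dict nums []]
  simp only [List.nil_append]
  rw [PySem.Dict.values_eq_map_keys _ (PySem.Dict.nodup_keys_counter _) 0,
      PySem.Dict.keys_counter]
  rw [List.foldl_map]
  have h := foldA_vals (fun k => (PySem.Dict.counter (nums.map revDiff)).getD k 0)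
      (PySem.Set.ofList (nums.map revDiff)) 0
  rw [Int.zero_emod] at h
  rw [h]
  rw [List.map_congr_left (fun k _ => by
        rw [PySem.Dict.getD_counter (nums.map revDiff) k] :
      ∀ k ∈ PySem.Set.ofList (nums.map revDiff),
        pairF ((PySem.Dict.counter (nums.map revDiff)).getD k 0)
          = pairF ((List.count k (nums.map revDiff) : Nat) : Int))]
  simp only [zero_add, pairTotal]

theorem countNicePairs_alt_eq (nums : List Int) :
    countNicePairs_alt nums = pairTotal (nums.map revDiff) % (10 ^ 9 + 7) := by
  unfold countNicePairs_alt
  simp only []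
  rw [show ((PySem.Dict.empty : PySem.Dict Int Int), (0 : Int))
        = (PySem.Dict.counter ([] : List Int), (0 : Int) % (10 ^ 9 + 7)) from rfl]
  rw [foldB nums [] 0]
  have := pairSum_eq_total (nums.map revDiff) []
  simp only [pairTotal, List.nil_append] at this ⊢
  rw [zero_add, ← this]
  simp [PySem.Set.ofList]

-- ===== VERDICT (by name: the statement is the Claim_ definition above) =====
theorem countNicePairs_spec : Claim_equal_countNicePairs := by
  intro nums _ _
  unfold Spec_countNicePairs
  rw [countNicePairs_eq, countNicePairs_alt_eq]
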